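-- pv_equiv track=rewrite | github.com/mochilovesoporto/Scrabble | Code Challenges.py | unique_english_letters
-- ===== SOURCE A (Python) =====
-- letters = "ABCDEFGHIJKLMNOPQRSTUVWXYZabcdefghijklmnopqrstuvwxyz"
--
-- def unique_english_letters(word):
--   counted_letters = []
--   count = 0
--   for i in word:
--     for letter in letters:
--       if counted_letters.count(i) > 0:
--         continue
--       elif i == letter:
--         count += 1
--         counted_letters.append(i)
--   return count
-- ===== SOURCE B (Python) =====
-- letters = "ABCDEFGHIJKLMNOPQRSTUVWXYZabcdefghijklmnopqrstuvwxyz"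
--
-- def unique_english_letters(word):
--   return sum(1 for letter in letters if letter in word)
-- ===== Notes on version B (the rewrite author's own statement) =====
-- stated objective: faster
-- what changed: Instead of scanning the word and deduplicating into a seen-list (rescanning it with .count for each of the 52 alphabet letters per character), B iterates the fixed 52-letter alphabet once and counts the letters that occur in the word.
import Mathlib
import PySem

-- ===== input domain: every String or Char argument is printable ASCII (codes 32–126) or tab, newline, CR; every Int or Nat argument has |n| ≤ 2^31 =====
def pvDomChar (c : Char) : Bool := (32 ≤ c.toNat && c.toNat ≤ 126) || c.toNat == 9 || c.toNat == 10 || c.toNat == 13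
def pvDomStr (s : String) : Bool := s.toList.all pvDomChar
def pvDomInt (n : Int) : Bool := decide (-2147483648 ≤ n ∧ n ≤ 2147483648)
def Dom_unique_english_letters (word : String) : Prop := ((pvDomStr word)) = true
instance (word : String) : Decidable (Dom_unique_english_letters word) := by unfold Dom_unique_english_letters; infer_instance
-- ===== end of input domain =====

-- B iterates the fixed alphabet and counts letters occurring in the word, instead of A's
-- scan of the word deduplicating into a seen-list. Equivalence proved on all of Dom (total).

-- the module constant `letters`
def pvLetters : List Char := "ABCDEFGHIJKLMNOPQRSTUVWXYZabcdefghijklmnopqrstuvwxyz".toList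

-- ===== PORT A =====
-- inner `for letter in letters:` loop body (continue / elif kept in order)
def pvInnerA (i : Char) (ls : List Char) (cl : List Char) (c : Int) : List Char × Int :=
  match ls with
  | [] => (cl, c)
  | l :: ls' =>
    if PySem.List.count cl i > 0 then pvInnerA i ls' cl c
    else if i = l then pvInnerA i ls' (cl ++ [i]) (c + 1)
    else pvInnerA i ls' cl c

-- outer `for i in word:` loop
def pvLoopA (ws : List Char) (cl : List Char) (c : Int) : Int :=
  match ws with
  | [] => c
  | i :: ws' =>
    let p := pvInnerA i pvLetters cl c
    pvLoopA ws' p.1 p.2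

def unique_english_letters (word : String) : Int := pvLoopA word.toList [] 0

-- ===== PORT B =====
-- sum(1 for letter in letters if letter in word); `letter in word` is single-char
-- membership, exact here since `letter` is one character
def unique_english_letters_alt (word : String) : Int :=
  pvLetters.foldl (fun acc letter => if letter ∈ word.toList then acc + 1 else acc) 0

-- ===== PRECONDITION & SPEC =====
def Spec_unique_english_letters (word : String) (out : Int) : Prop := out = unique_english_letters_alt word
instance (word : String) (out : Int) : Decidable (Spec_unique_english_letters word out) := by unfold Spec_unique_english_letters; infer_instance

-- ===== CLAIM (what is proved, stated in full; the proofs are below) =====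
def Claim_equal_unique_english_letters : Prop := ∀ (word : String), Dom_unique_english_letters word → Spec_unique_english_letters word (unique_english_letters word)

-- ===== LEMMAS AND PROOFS =====

-- A's inner loop: a no-op when i was already counted or i is not a letter,
-- otherwise it appends i once and bumps the count once.
theorem pvInnerA_spec (i : Char) (ls cl : List Char) (c : Int) :
    pvInnerA i ls cl c =
      if 0 < cl.count i ∨ i ∉ ls then (cl, c) else (cl ++ [i], c + 1) := by
  induction ls generalizing cl c with
  | nil => simp [pvInnerA]
  | cons l ls' ih =>
    simp only [pvInnerA, PySem.List.count_eq]
    by_cases h0 : List.count i cl > 0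
    · rw [if_pos h0, ih, if_pos (Or.inl h0), if_pos (Or.inl h0)]
    · rw [if_neg h0]
      by_cases hil : i = l
      · subst hil
        rw [if_pos rfl, ih]
        rw [if_pos (Or.inl (by simp))]
        rw [if_neg (by rintro (h | h); exacts [h0 h, h (by simp)])]
      · rw [if_neg hil, ih]
        by_cases his : i ∈ ls'
        · rw [if_neg (by simp [h0, his]), if_neg (by simp [h0, his, hil])]
        · rw [if_pos (Or.inr his), if_pos (Or.inr (by simp [hil, his]))]

-- counting-step: removing a fresh letter i from the candidates costs exactly 1,
-- because the (nodup) alphabet contains i once.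
theorem pvFilter_step (L : List Char) (hnd : L.Nodup) (i : Char) (rest cl : List Char)
    (hi : i ∈ L) (hcl : i ∉ cl) :
    (L.filter (fun l => decide (l ∈ i :: rest ∧ l ∉ cl))).length
      = (L.filter (fun l => decide (l ∈ rest ∧ l ∉ cl ++ [i]))).length + 1 := by
  induction L with
  | nil => cases hi
  | cons a L' ih =>
    rcases List.nodup_cons.mp hnd with ⟨haL, hnd'⟩
    by_cases hai : a = i
    · subst hai
      have hfc : L'.filter (fun l => decide (l ∈ a :: rest ∧ l ∉ cl))
           = L'.filter (fun l => decide (l ∈ rest ∧ l ∉ cl ++ [a])) := by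
        apply List.filter_congr
        intro x hx
        have hxa : x ≠ a := fun h => haL (h ▸ hx)
        simp [hxa]
      simp only [List.filter_cons]
      rw [if_pos (by simp [hcl]), if_neg (by simp)]
      rw [List.length_cons, hfc]
    · have hi' : i ∈ L' := by
        rcases List.mem_cons.mp hi with h | h
        · exact absurd h (fun hh => hai hh.symm)
        · exact h
      have hcond : (decide (a ∈ i :: rest ∧ a ∉ cl)) = (decide (a ∈ rest ∧ a ∉ cl ++ [i])) := by
        simp [hai]
      simp only [List.filter_cons, hcond]
      have hlen := ih hnd' hi'
      by_cases hb : a ∈ rest ∧ a ∉ cl ++ [i]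
      · rw [if_pos (decide_eq_true hb), if_pos (decide_eq_true hb)]
        simp only [List.length_cons]
        omega
      · rw [if_neg (by simpa using hb), if_neg (by simpa using hb)]
        exact hlen

theorem pvLetters_nodup : pvLetters.Nodup := by decide

-- A's outer loop computes: count so far + letters occurring in the remaining word, not yet seen.
theorem pvLoopA_spec (ws : List Char) (cl : List Char) (c : Int) :
    pvLoopA ws cl c
      = c + ((pvLetters.filter (fun l => decide (l ∈ ws ∧ l ∉ cl))).length : Int) := by
  induction ws generalizing cl c with
  | nil => simp [pvLoopA]
  | cons i ws' ih =>
    simp only [pvLoopA, pvInnerA_spec]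
    by_cases h0 : 0 < cl.count i ∨ i ∉ pvLetters
    · rw [if_pos h0]
      have heq : List.filter (fun l => decide (l ∈ i :: ws' ∧ l ∉ cl)) pvLetters
               = List.filter (fun l => decide (l ∈ ws' ∧ l ∉ cl)) pvLetters := by
        apply List.filter_congr
        intro x hx
        rcases h0 with h0 | h0
        · have hicl : i ∈ cl := List.count_pos_iff.mp h0
          by_cases hxi : x = i
          · subst hxi; simp [hicl]
          · simp [hxi]
        · have hxi : x ≠ i := fun h => h0 (h ▸ hx)
          simp [hxi]
      rw [ih, heq]
    · push_neg at h0
      obtain ⟨h1, h2⟩ := h0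
      have hcl : i ∉ cl := by
        intro h; exact absurd (List.count_pos_iff.mpr h) (by omega)
      rw [if_neg (by push_neg; exact ⟨h1, h2⟩)]
      rw [ih]
      rw [pvFilter_step pvLetters pvLetters_nodup i ws' cl h2 hcl]
      push_cast
      ring

-- B's fold is the same filtered count.
theorem pvFoldB (L : List Char) (ws : List Char) (acc : Int) :
    L.foldl (fun a letter => if letter ∈ ws then a + 1 else a) acc
      = acc + ((L.filter (fun l => decide (l ∈ ws))).length : Int) := by
  induction L generalizing acc with
  | nil => simp
  | cons l L' ih =>
    by_cases h : l ∈ ws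
    · simp [h, ih]
      ring
    · simp [h, ih]

-- ===== VERDICT (by name: the statement is the Claim_ definition above) =====
theorem unique_english_letters_spec : Claim_equal_unique_english_letters := by
  intro word _
  show unique_english_letters word = unique_english_letters_alt word
  rw [unique_english_letters, unique_english_letters_alt, pvLoopA_spec, pvFoldB]
  simp
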